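-- pv_equiv track=rewrite | github.com/Igor-Zwirtes/prog1 | lista3/lista3.py | get_vogals
-- ===== SOURCE A (Python) =====
-- def get_vogals(text):
--     vogals_list = []
--     vogals = ['a','e','i','o','u']
--     for i in range(len(text)):
--         if (text[i].lower() in vogals):
--             if (text[i].lower() not in vogals_list):
--                 vogals_list.append(text[i].lower())
--     vogals_list.sort()
--     return vogals_list
-- ===== SOURCE B (Python) =====
-- def get_vogals(text):
--     lowered = [c.lower() for c in text]
--     return [v for v in 'aeiou' if v in lowered]
-- ===== Notes on version B (the rewrite author's own statement) =====
-- stated objective: simpler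
-- what changed: Inverts the control flow: instead of scanning every text character, deduplicating into a list and sorting it at the end, B lowercases the text once and loops over the fixed five-vowel alphabet (already in alphabetical order), keeping the vowels that occur, so no dedup structure and no sort are needed.
import Mathlib
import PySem

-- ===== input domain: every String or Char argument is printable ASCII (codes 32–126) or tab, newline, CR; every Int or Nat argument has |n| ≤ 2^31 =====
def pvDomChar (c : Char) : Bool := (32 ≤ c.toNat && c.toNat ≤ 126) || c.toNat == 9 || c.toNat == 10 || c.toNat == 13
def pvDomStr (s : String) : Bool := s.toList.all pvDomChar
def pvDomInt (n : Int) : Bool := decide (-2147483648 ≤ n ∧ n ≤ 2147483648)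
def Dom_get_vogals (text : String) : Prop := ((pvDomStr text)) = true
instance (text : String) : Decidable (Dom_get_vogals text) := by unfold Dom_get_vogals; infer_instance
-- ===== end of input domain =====

-- B inverts A's control flow: it lowercases the text once and keeps the vowels of the
-- already-sorted alphabet "aeiou" that occur, so no dedup list and no sort are needed (simpler).


-- ===== PORT A =====
-- A: for i in range(len(text)): if text[i].lower() in vogals and text[i].lower() not in
-- vogals_list, append text[i].lower(); finally vogals_list.sort().
def get_vogals (text : String) : List String :=
  let cs := text.toList
  let vogals : List String := ["a", "e", "i", "o", "u"]
  let vogals_list :=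
    (PySem.List.pyRange 0 (PySem.Str.len text) 1).foldl
      (fun acc i =>
        if String.ofList [PySem.Chars.lowerChar (PySem.List.pyGetD cs i ' ')] ∈ vogals then
          (if String.ofList [PySem.Chars.lowerChar (PySem.List.pyGetD cs i ' ')] ∉ acc then
            acc ++ [String.ofList [PySem.Chars.lowerChar (PySem.List.pyGetD cs i ' ')]]
          else acc)
        else acc) []
  PySem.List.sorted vogals_list (fun x => x) false

-- ===== PORT B =====
-- B: lowered = [c.lower() for c in text]; return [v for v in 'aeiou' if v in lowered]
def get_vogals_alt (text : String) : List String :=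
  let lowered := text.toList.map (fun c => String.ofList [PySem.Chars.lowerChar c])
  (["a", "e", "i", "o", "u"] : List String).filter (fun v => v ∈ lowered)

-- ===== PRECONDITION & SPEC =====
def Spec_get_vogals (text : String) (out : List String) : Prop := out = get_vogals_alt text
instance (text : String) (out : List String) : Decidable (Spec_get_vogals text out) := by unfold Spec_get_vogals; infer_instance

-- ===== CLAIM (what is proved, stated in full; the proofs are below) =====
def Claim_equal_get_vogals : Prop := ∀ (text : String), Dom_get_vogals text → Spec_get_vogals text (get_vogals text)

-- ===== LEMMAS AND PROOFS =====

-- Invariant of A's collecting loop: the accumulator stays nodup and holds exactly the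
-- initial elements plus the members of V occurring in the traversed part.
theorem pv_loop_inv (V : List String) (l : List String) (acc : List String) (h : acc.Nodup) :
    (l.foldl (fun acc s => if s ∈ V then (if s ∉ acc then acc ++ [s] else acc) else acc) acc).Nodup ∧
    ∀ x, x ∈ l.foldl (fun acc s => if s ∈ V then (if s ∉ acc then acc ++ [s] else acc) else acc) acc ↔
      x ∈ acc ∨ (x ∈ V ∧ x ∈ l) := by
  induction l generalizing acc with
  | nil => simpa using h
  | cons c t ih =>
    simp only [List.foldl_cons]
    by_cases hv : c ∈ V
    · by_cases hna : c ∈ acc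
      · rw [if_pos hv, if_neg (by simpa using hna)]
        obtain ⟨hn, hm⟩ := ih acc h
        refine ⟨hn, fun x => ?_⟩
        rw [hm x]
        simp only [List.mem_cons]
        have hxc : x = c → x ∈ acc := fun e => e ▸ hna
        tauto
      · rw [if_pos hv, if_pos (by simpa using hna)]
        have h' : (acc ++ [c]).Nodup :=
          h.append (List.nodup_singleton c) (by simpa [List.disjoint_singleton] using hna)
        obtain ⟨hn, hm⟩ := ih (acc ++ [c]) h'
        refine ⟨hn, fun x => ?_⟩
        rw [hm x]
        simp only [List.mem_append, List.mem_cons]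
        have hxc : x = c → x ∈ V := fun e => e ▸ hv
        tauto
    · rw [if_neg hv]
      obtain ⟨hn, hm⟩ := ih acc h
      refine ⟨hn, fun x => ?_⟩
      rw [hm x]
      simp only [List.mem_cons]
      have hxc : x = c → x ∉ V := fun e => e ▸ hv
      tauto

-- The whole equality, stated over the character list of the input.
theorem pv_main (cs : List Char) :
    PySem.List.sorted
      ((PySem.List.pyRange 0 (PySem.List.len cs) 1).foldl
        (fun acc i =>
          if String.ofList [PySem.Chars.lowerChar (PySem.List.pyGetD cs i ' ')] ∈ (["a", "e", "i", "o", "u"] : List String) then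
            (if String.ofList [PySem.Chars.lowerChar (PySem.List.pyGetD cs i ' ')] ∉ acc then
              acc ++ [String.ofList [PySem.Chars.lowerChar (PySem.List.pyGetD cs i ' ')]]
            else acc)
          else acc) []) (fun x => x) false
    = (["a", "e", "i", "o", "u"] : List String).filter
        (fun v => v ∈ cs.map (fun c => String.ofList [PySem.Chars.lowerChar c])) := by
  set V : List String := ["a", "e", "i", "o", "u"] with hV
  set L : List String := cs.map (fun c => String.ofList [PySem.Chars.lowerChar c]) with hL
  have hstep :
      (PySem.List.pyRange 0 (PySem.List.len cs) 1).foldl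
        (fun acc i =>
          if String.ofList [PySem.Chars.lowerChar (PySem.List.pyGetD cs i ' ')] ∈ V then
            (if String.ofList [PySem.Chars.lowerChar (PySem.List.pyGetD cs i ' ')] ∉ acc then
              acc ++ [String.ofList [PySem.Chars.lowerChar (PySem.List.pyGetD cs i ' ')]]
            else acc)
          else acc) [] =
      L.foldl (fun acc s => if s ∈ V then (if s ∉ acc then acc ++ [s] else acc) else acc) [] := by
    calc _ = cs.foldl (fun acc ch =>
              let s := String.ofList [PySem.Chars.lowerChar ch]
              if s ∈ V then (if s ∉ acc then acc ++ [s] else acc) else acc) [] :=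
            PySem.List.foldl_pyRange_zero_pyGetD cs ' '
              (fun acc ch =>
                let s := String.ofList [PySem.Chars.lowerChar ch]
                if s ∈ V then (if s ∉ acc then acc ++ [s] else acc) else acc) []
      _ = _ := by rw [List.foldl_map]
  rw [hstep]
  obtain ⟨hn, hm⟩ := pv_loop_inv V L [] List.nodup_nil
  apply PySem.List.sorted_eq_of_perm_of_pairwise_lt
  · rw [List.perm_ext_iff_of_nodup (List.Nodup.filter _ (by rw [hV]; decide)) hn]
    intro a
    rw [hm a, List.mem_filter]
    simp
  · have hp : V.Pairwise (fun a b : String => a < b) := by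
      rw [hV]
      simp [String.lt_iff_toList_lt]
      decide
    exact hp.filter _

-- ===== VERDICT (by name: the statement is the Claim_ definition above) =====
theorem get_vogals_spec : Claim_equal_get_vogals := by
  intro text _
  unfold Spec_get_vogals get_vogals get_vogals_alt
  exact pv_main text.toList
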